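-- pv_equiv track=rewrite | github.com/Bforartists/Bforartists | release/scripts/blender-addons-contrib/io_export_marmalade.py | StripName
-- ===== SOURCE A (Python) =====
-- def StripName(Name):
--
--     def ReplaceSet(String, OldSet, NewChar):
--         for OldChar in OldSet:
--             String = String.replace(OldChar, NewChar)
--         return String
--
--     import string
--
--     NewName = ReplaceSet(Name, string.punctuation + " ", "_")
--     return NewName
-- ===== SOURCE B (Python) =====
-- import string
--
-- _BAD = set(string.punctuation + " ")
--
-- def StripName(Name):
--     return ''.join('_' if c in _BAD else c for c in Name)
-- ===== Notes on version B (the rewrite author's own statement) =====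
-- stated objective: idiomatic
-- what changed: B makes a single pass over the input, mapping each character through a precomputed membership set, instead of A's loop over the 33 punctuation/space characters that rescans the whole string with str.replace for each of them.
import Mathlib
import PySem

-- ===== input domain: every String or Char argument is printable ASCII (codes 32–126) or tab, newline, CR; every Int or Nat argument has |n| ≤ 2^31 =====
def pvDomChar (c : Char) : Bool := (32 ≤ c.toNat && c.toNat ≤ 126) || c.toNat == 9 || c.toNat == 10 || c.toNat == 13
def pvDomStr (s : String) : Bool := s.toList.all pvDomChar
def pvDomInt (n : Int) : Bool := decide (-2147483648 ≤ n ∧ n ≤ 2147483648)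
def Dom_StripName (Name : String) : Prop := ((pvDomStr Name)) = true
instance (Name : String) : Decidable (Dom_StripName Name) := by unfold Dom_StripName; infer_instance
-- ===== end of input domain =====

-- B replaces A's 33 str.replace passes (one per punctuation/space char) by a single pass that
-- maps each character through a precomputed membership set; same return value, no side effects.

-- ===== PORT A =====
-- string.punctuation + " "
def pvOldSet_StripName : String := "!\"#$%&'()*+,-./:;<=>?@[\\]^_`{|}~ "

-- for OldChar in OldSet: String = String.replace(OldChar, NewChar)
def pvReplaceSet (s : String) (oldSet : String) (newChar : String) : String :=
  oldSet.toList.foldl (fun acc oldChar => PySem.Str.replace acc (String.ofList [oldChar]) newChar) s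

def StripName (Name : String) : String :=
  pvReplaceSet Name pvOldSet_StripName "_"

-- ===== PORT B =====
-- _BAD = set(string.punctuation + " ")
def pvBad_StripName : PySem.Set Char := PySem.Set.ofList "!\"#$%&'()*+,-./:;<=>?@[\\]^_`{|}~ ".toList

-- ''.join('_' if c in _BAD else c for c in Name)
def StripName_alt (Name : String) : String :=
  String.ofList (Name.toList.map (fun c => if PySem.Set.contains pvBad_StripName c then '_' else c))

-- ===== PRECONDITION & SPEC =====
def Spec_StripName (Name : String) (out : String) : Prop := out = StripName_alt Name
instance (Name : String) (out : String) : Decidable (Spec_StripName Name out) := by unfold Spec_StripName; infer_instance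

-- ===== CLAIM (what is proved, stated in full; the proofs are below) =====
def Claim_equal_StripName : Prop := ∀ (Name : String), Dom_StripName Name → Spec_StripName Name (StripName Name)

-- ===== LEMMAS AND PROOFS =====

-- single-character str.replace is a pointwise map
lemma replace_go_single (o n : Char) :
    ∀ (l : List Char) (fuel : Nat) (acc : List Char), l.length ≤ fuel →
      PySem.Chars.replace.go [o] [n] fuel l acc
        = acc.reverse ++ l.map (fun c => if c = o then n else c) := by
  intro l
  induction l with
  | nil =>
    intro fuel acc _
    cases fuel <;> simp [PySem.Chars.replace.go]
  | cons c t ih =>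
    intro fuel acc hf
    cases fuel with
    | zero => simp at hf
    | succ fuel =>
      have ht : t.length ≤ fuel := by simpa using hf
      by_cases hc : c = o
      · subst hc
        simp [PySem.Chars.replace.go, List.isPrefixOf, ih fuel (n :: acc) ht]
      · simp [PySem.Chars.replace.go, List.isPrefixOf, Ne.symm hc, hc, ih fuel (c :: acc) ht]

lemma replace_single (o n : Char) (l : List Char) :
    PySem.Chars.replace l [o] [n] = l.map (fun c => if c = o then n else c) := by
  simp [PySem.Chars.replace, replace_go_single o n l l.length [] le_rfl]

-- fold of pointwise maps = one map of the folded pointwise function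
lemma foldl_map_comm (g : Char → Char → Char) :
    ∀ (bads : List Char) (l : List Char),
      bads.foldl (fun s o => s.map (g o)) l
        = l.map (fun c => bads.foldl (fun c o => g o c) c) := by
  intro bads
  induction bads with
  | nil => simp
  | cons o bs ih => intro l; simp [List.foldl_cons, ih, List.map_map, Function.comp]

-- replacing each bad char by '_' in turn hits each char once
lemma foldl_point (n : Char) :
    ∀ (bads : List Char) (c : Char),
      bads.foldl (fun c o => if c = o then n else c) c = if c ∈ bads then n else c := by
  intro bads
  induction bads with
  | nil => simp
  | cons o bs ih =>
    intro c
    by_cases hc : c = o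
    · subst hc
      simp [List.foldl_cons, ih n, ite_self]
    · simp [List.foldl_cons, hc, ih c]

theorem stripName_eq (Name : String) : StripName Name = StripName_alt Name := by
  apply String.toList_inj.mp
  have h : ∀ (s : String),
      (pvReplaceSet s pvOldSet_StripName "_").toList
        = pvOldSet_StripName.toList.foldl
            (fun l o => l.map (fun c => if c = o then '_' else c)) s.toList := by
    intro s
    unfold pvReplaceSet
    generalize pvOldSet_StripName.toList = bads
    induction bads generalizing s with
    | nil => simp
    | cons o bs ih =>
      simp only [List.foldl_cons]
      rw [ih (PySem.Str.replace s (String.ofList [o]) "_")]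
      congr 1
      rw [PySem.Str.toList_replace]
      simp [replace_single]
  show (pvReplaceSet Name pvOldSet_StripName "_").toList = _
  rw [h Name, foldl_map_comm]
  unfold StripName_alt
  simp only [String.toList_ofList]
  refine List.map_congr_left ?_
  intro c _
  rw [foldl_point]
  by_cases hm : c ∈ pvOldSet_StripName.toList
  · have hb : c ∈ pvBad_StripName := by
      rw [pvBad_StripName]; exact (PySem.Set.mem_ofList _ _).mpr hm
    simp [hm, hb]
  · have hb : c ∉ pvBad_StripName := by
      rw [pvBad_StripName]; exact fun h => hm ((PySem.Set.mem_ofList _ _).mp h)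
    simp [hm, hb]

-- ===== VERDICT (by name: the statement is the Claim_ definition above) =====
theorem StripName_spec : Claim_equal_StripName := by
  intro Name _
  exact stripName_eq Name
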